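-- pv_equiv track=rewrite | github.com/miliar/Code_Jam_Webscraper | Solutions_python/Problem_203/185.py | do_case
-- ===== SOURCE A (Python) =====
-- def noInit(line):
--     return line==len(line)*'?'
--
-- def splitline(line):
--     result=['' for i in range(len(line))]
--     found=False
--     empty=0
--     for i in range(len(line)):
--         if (line[i]=='?'):
--             if found:
--                 result[i]=result[i-1]
--             else:
--                 empty+=1
--         else:
--             result[i]=line[i]
--             found=True
--     for i in range(empty):
--         result[i]=result[empty]
--     return ''.join(result)
--
-- def do_case(parsed):
--     result=['' for i in range(len(parsed))]
--     found=False
--     empty=0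
--     for i in range(len(parsed)):
--         if noInit(parsed[i]):
--             if found:
--                 result[i]=result[i-1]
--             else:
--                 empty+=1
--         else:
--             result[i]=splitline(parsed[i])
--             found=True
--     for i in range(empty):
--         result[i]=result[empty]
--     return '\n'.join(result)
-- ===== SOURCE B (Python) =====
-- def do_case(parsed):
--     def fill(items, missing, transform):
--         # index every non-missing item, then emit replicated blocks between real indices
--         reals = [(i, transform(x)) for i, x in enumerate(items) if not missing(x)]
--         if not items:
--             return []
--         nexts = [i for i, _ in reals[1:]] + [len(items)]
--         idx0, v0 = reals[0]
--         out = [v0] * idx0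
--         for (i, v), nxt in zip(reals, nexts):
--             out += [v] * (nxt - i)
--         return out
--
--     def fill_line(line):
--         return ''.join(fill(list(line), lambda c: c == '?', lambda c: c))
--
--     return '\n'.join(fill(parsed, lambda l: l == '?' * len(l), fill_line))
-- ===== Notes on version B (the rewrite author's own statement) =====
-- stated objective: alternative
-- what changed: Replaces A's per-element scan with a found-flag/empty-counter and a second backfill pass (at both line and character level) by a block construction: collect the (index, value) pairs of the non-missing items once, pair each with the next real index via zip, and emit the output as replicated blocks between consecutive real indices.
-- outside the precondition, e.g. on do_case(['??', '']): A raises IndexError, B raises IndexError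
import Mathlib
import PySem

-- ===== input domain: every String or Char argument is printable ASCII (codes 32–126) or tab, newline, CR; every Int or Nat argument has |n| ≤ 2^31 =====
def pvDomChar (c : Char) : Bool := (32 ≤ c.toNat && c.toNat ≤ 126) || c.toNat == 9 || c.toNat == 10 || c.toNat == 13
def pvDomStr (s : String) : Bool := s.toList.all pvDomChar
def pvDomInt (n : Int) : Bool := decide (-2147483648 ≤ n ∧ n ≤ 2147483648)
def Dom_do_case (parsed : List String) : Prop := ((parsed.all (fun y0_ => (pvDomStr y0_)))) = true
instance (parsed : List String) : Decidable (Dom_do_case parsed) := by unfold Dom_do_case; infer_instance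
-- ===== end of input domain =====

-- B replaces A's duplicated scan-with-carry + backfill pass by a block construction over the
-- (index, value) pairs of the non-missing items, at both levels (objective: alternative).


-- ===== PORT A =====
-- noInit(line): line == len(line)*'?'   (string comparison ported on .toList)
def noInitA (line : String) : Bool :=
  line.toList == List.replicate line.toList.length '?'

-- splitline: scan with found flag / empty counter writing result[i], then backfill result[0:empty]
def splitlineA (line : String) : String :=
  let cs := line.toList
  let st := (List.range cs.length).foldl
    (fun (st : List String × Bool × Nat) i =>
      if (cs.getD i ' ') == '?' then
        if st.2.1 then (st.1.set i (st.1.getD (i - 1) ""), st.2.1, st.2.2)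
        else (st.1, st.2.1, st.2.2 + 1)
      else (st.1.set i (String.ofList [cs.getD i ' ']), true, st.2.2))
    (List.replicate cs.length "", false, 0)
  let result := (List.range st.2.2).foldl (fun r i => r.set i (r.getD st.2.2 "")) st.1
  PySem.Str.join "" result

-- do_case: the same scan at the line level, joined with '\n'
def do_case (parsed : List String) : String :=
  let st := (List.range parsed.length).foldl
    (fun (st : List String × Bool × Nat) i =>
      if noInitA (parsed.getD i "") then
        if st.2.1 then (st.1.set i (st.1.getD (i - 1) ""), st.2.1, st.2.2)
        else (st.1, st.2.1, st.2.2 + 1)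
      else (st.1.set i (splitlineA (parsed.getD i "")), true, st.2.2))
    (List.replicate parsed.length "", false, 0)
  let result := (List.range st.2.2).foldl (fun r i => r.set i (r.getD st.2.2 "")) st.1
  PySem.Str.join "\n" result

-- ===== PORT B =====
-- fill(items, missing, transform): index the non-missing items once (enumerate + filter),
-- pair each real index with the next one via zip, and emit replicated blocks.
-- reals[0] raises IndexError in Python exactly when items ≠ [] and reals = [] (outside Pre_);
-- the port reads it with getD there.
def fillB {α : Type} (items : List α) (missing : α → Bool) (transform : α → String) : List String :=
  let reals := ((PySem.List.enumerate items).filter (fun p => !missing p.2)).map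
    (fun p => (p.1, transform p.2))
  if items.isEmpty then []
  else
    let nexts := ((reals.drop 1).map Prod.fst) ++ [(items.length : Int)]
    let hd := reals.getD 0 (0, "")
    let out := List.replicate hd.1.toNat hd.2
    (reals.zip nexts).foldl (fun out p => out ++ List.replicate (p.2 - p.1.1).toNat p.1.2) out

def do_case_alt (parsed : List String) : String :=
  PySem.Str.join "\n"
    (fillB parsed (fun l => l.toList == List.replicate l.toList.length '?')
      (fun l => PySem.Str.join "" (fillB l.toList (fun c => c == '?') (fun c => String.ofList [c]))))

-- ===== PRECONDITION & SPEC =====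
-- Pre_ excludes exactly the inputs where A raises IndexError (a nonempty list all of whose lines
-- consist only of '?', including empty lines): result[empty] is out of range there.
def Pre_do_case (parsed : List String) : Prop :=
  parsed = [] ∨ ∃ l ∈ parsed, ¬ (l.toList = List.replicate l.toList.length '?')
instance (parsed : List String) : Decidable (Pre_do_case parsed) := by unfold Pre_do_case; infer_instance

def pvWitness_do_case : List String := ["a?", "??"]

def Spec_do_case (parsed : List String) (out : String) : Prop := out = do_case_alt parsed
instance (parsed : List String) (out : String) : Decidable (Spec_do_case parsed out) := by unfold Spec_do_case; infer_instance

-- ===== CLAIM (what is proved, stated in full; the proofs are below) =====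
def Claim_equal_do_case : Prop := ∀ (parsed : List String), Dom_do_case parsed → Pre_do_case parsed → Spec_do_case parsed (do_case parsed)

-- ===== LEMMAS AND PROOFS =====

-- forward-fill reference semantics (proof-side only)
def pvFfwd {α : Type} (missing : α → Bool) (transform : α → String) : String → List α → List String
  | _, [] => []
  | cur, x :: xs =>
    (if !missing x then transform x else cur) ::
      pvFfwd missing transform (if !missing x then transform x else cur) xs

def pvCarry {α : Type} (missing : α → Bool) (transform : α → String) : String → List α → String
  | cur, [] => cur
  | cur, x :: xs => pvCarry missing transform (if !missing x then transform x else cur) xs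

def loopAStep {α : Type} (d : α) (m : α → Bool) (t : α → String) (items : List α)
    (st : List String × Bool × Nat) (i : Nat) : List String × Bool × Nat :=
  if m (items.getD i d) then
    if st.2.1 then (st.1.set i (st.1.getD (i - 1) ""), st.2.1, st.2.2)
    else (st.1, st.2.1, st.2.2 + 1)
  else (st.1.set i (t (items.getD i d)), true, st.2.2)

def loopA {α : Type} (d : α) (m : α → Bool) (t : α → String) (items : List α) (k : Nat) :
    List String × Bool × Nat :=
  (List.range k).foldl (loopAStep d m t items) (List.replicate items.length "", false, 0)

def fillA {α : Type} (d : α) (m : α → Bool) (t : α → String) (items : List α) : List String :=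
  let st := loopA d m t items items.length
  (List.range st.2.2).foldl (fun r i => r.set i (r.getD st.2.2 "")) st.1

-- B-side reference: the (index, value) list of the non-missing items, and the block emitter
def realsOf {α : Type} (m : α → Bool) (t : α → String) : Int → List α → List (Int × String)
  | _, [] => []
  | i, x :: xs =>
    if m x then realsOf m t (i+1) xs else (i, t x) :: realsOf m t (i+1) xs

def blocksOf : List (Int × String) → Int → List String
  | [], _ => []
  | (i, v) :: rest, total =>
    List.replicate (((match rest with | [] => total | (j, _) :: _ => j) - i).toNat) v ++
      blocksOf rest total

theorem length_pvFfwd {α : Type} (m : α → Bool) (t : α → String) (cur : String) (xs : List α) :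
    (pvFfwd m t cur xs).length = xs.length := by
  induction xs generalizing cur with
  | nil => rfl
  | cons x xs ih => simp [pvFfwd, ih]

theorem pvFfwd_append_singleton {α : Type} (m : α → Bool) (t : α → String) (cur : String)
    (ys : List α) (y : α) :
    pvFfwd m t cur (ys ++ [y]) =
      pvFfwd m t cur ys ++ [if !m y then t y else pvCarry m t cur ys] := by
  induction ys generalizing cur with
  | nil => simp [pvFfwd, pvCarry]
  | cons z zs ih => simp [pvFfwd, pvCarry, ih]

theorem pvFfwd_getD_last {α : Type} (m : α → Bool) (t : α → String) (cur : String)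
    (ys : List α) (h : ys ≠ []) :
    (pvFfwd m t cur ys).getD (ys.length - 1) "" = pvCarry m t cur ys := by
  induction ys generalizing cur with
  | nil => exact absurd rfl h
  | cons y ys ih =>
    cases ys with
    | nil => simp [pvFfwd, pvCarry]
    | cons z zs =>
      have := ih (cur := if !m y then t y else cur) (by simp)
      simpa [pvFfwd, pvCarry] using this

theorem loopA_all_missing {α : Type} (d : α) (m : α → Bool) (t : α → String) (items : List α)
    (k : Nat) (hk : k ≤ items.length) (h : ∀ x ∈ items.take k, m x = true) :
    loopA d m t items k = (List.replicate items.length "", false, k) := by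
  induction k with
  | zero => rfl
  | succ k ih =>
    have hkn : k < items.length := by omega
    have htake : items.take (k+1) = items.take k ++ [items[k]] := by
      rw [List.take_add_one, List.getElem?_eq_getElem hkn]; rfl
    have hk' : m items[k] = true := by
      refine h _ ?_
      rw [htake]; exact List.mem_append_right _ (List.mem_singleton_self _)
    have h' : ∀ x ∈ items.take k, m x = true := fun x hx =>
      h x (by rw [htake]; exact List.mem_append_left _ hx)
    have hstep : loopA d m t items (k+1) =
        loopAStep d m t items (loopA d m t items k) k := by
      simp [loopA, List.range_succ]
    rw [hstep, ih (by omega) h', loopAStep, List.getD_eq_getElem _ _ hkn, hk']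
    simp

theorem loopA_found {α : Type} (d : α) (m : α → Bool) (t : α → String) (items : List α)
    (k : Nat) (pre : List α) (x : α) (mid : List α) (hk : k ≤ items.length)
    (hsplit : items.take k = pre ++ x :: mid) (hpre : ∀ y ∈ pre, m y = true)
    (hx : m x = false) :
    loopA d m t items k =
      (List.replicate pre.length "" ++ pvFfwd m t "" (x :: mid) ++
        List.replicate (items.length - k) "", true, pre.length) := by
  induction k generalizing mid with
  | zero => simp at hsplit
  | succ k ih =>
    have hkn : k < items.length := by omega
    have htake : items.take (k+1) = items.take k ++ [items[k]] := by
      rw [List.take_add_one, List.getElem?_eq_getElem hkn]; rfl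
    have hstep : loopA d m t items (k+1) =
        loopAStep d m t items (loopA d m t items k) k := by
      simp [loopA, List.range_succ]
    rcases List.eq_nil_or_concat mid with hmid | ⟨mid', y, hmid⟩
    · -- mid = []: item k is the FIRST real element; previous state is the all-missing one
      subst hmid
      have heq : items.take k ++ [items[k]] = pre ++ [x] := by rw [← htake, hsplit]
      obtain ⟨hpk, hxk⟩ := List.append_inj' heq (by simp)
      have hxk : items[k] = x := by simpa using hxk
      have hf : pre.length = k := by rw [← hpk]; simp; omega
      rw [hstep, loopA_all_missing d m t items k (by omega) (by rw [hpk]; exact hpre),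
        loopAStep, List.getD_eq_getElem _ _ hkn, hxk, hx]
      simp only [Bool.false_eq_true, if_false]
      have hrep : (List.replicate items.length "" : List String) =
          List.replicate k "" ++ List.replicate (items.length - k) "" := by
        rw [← List.replicate_add]; congr 1; omega
      have hrep2 : (List.replicate (items.length - k) "" : List String) =
          "" :: List.replicate (items.length - (k+1)) "" := by
        have h1 : items.length - k = (items.length - (k+1)) + 1 := by omega
        rw [h1, List.replicate_succ]
      rw [hrep, List.set_append_right _ _ (by simp)]
      simp only [List.length_replicate, Nat.sub_self, hrep2, List.set_cons_zero]
      simp [pvFfwd, hx, hf]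
    · -- mid = mid' ++ [y]: item k extends the filled region
      subst hmid
      have heq : items.take k ++ [items[k]] = (pre ++ x :: mid') ++ [y] := by
        rw [← htake, hsplit]; simp
      obtain ⟨hpk, hyk⟩ := List.append_inj' heq (by simp)
      have hyk : items[k] = y := by simpa using hyk
      have hlenk : pre.length + (mid'.length + 1) = k := by
        have h2 := congrArg List.length hpk
        simp at h2; omega
      have hW : (pvFfwd m t "" (x :: mid')).length = mid'.length + 1 := by
        rw [length_pvFfwd]; simp
      rw [hstep, ih mid' (by omega) hpk, loopAStep, List.getD_eq_getElem _ _ hkn, hyk]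
      set W := pvFfwd m t "" (x :: mid') with hWdef
      set c := pvCarry m t "" (x :: mid') with hcdef
      have hgetprev :
          ((List.replicate pre.length "" ++ W ++ List.replicate (items.length - k) "").getD
            (k-1) "") = c := by
        rw [List.append_assoc, List.getD_append_right _ _ _ _ (by simp; omega)]
        rw [List.getD_append _ _ _ _ (by simp [hW]; omega)]
        simp only [List.length_replicate]
        have h3 : k - 1 - pre.length = (x :: mid').length - 1 := by simp; omega
        rw [h3, hWdef, pvFfwd_getD_last m t "" (x :: mid') (by simp)]
      have hsetgen : ∀ (v : String),
          (List.replicate pre.length "" ++ W ++ List.replicate (items.length - k) "").set k v =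
            List.replicate pre.length "" ++ (W ++ [v]) ++
              List.replicate (items.length - (k+1)) "" := by
        intro v
        rw [List.append_assoc, List.set_append_right _ _ (by simp; omega),
          List.set_append_right _ _ (by simp [hW]; omega)]
        have hrep2 : (List.replicate (items.length - k) "" : List String) =
            "" :: List.replicate (items.length - (k+1)) "" := by
          have h4 : items.length - k = (items.length - (k+1)) + 1 := by omega
          rw [h4, List.replicate_succ]
        simp only [List.length_replicate]
        have hidx : k - pre.length - W.length = 0 := by simp [hW]; omega
        rw [hidx, hrep2, List.set_cons_zero]
        simp
      have happ : pvFfwd m t "" (x :: mid'.concat y) =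
          W ++ [if !m y then t y else c] := by
        have h5 : (x :: mid'.concat y) = (x :: mid') ++ [y] := by simp
        rw [h5, pvFfwd_append_singleton]
      by_cases hy : m y = true
      · rw [hy]; simp only [if_true, hgetprev, hsetgen c]
        rw [happ, hy]; simp
      · have hy' : m y = false := by revert hy; cases m y <;> simp
        rw [hy']; simp only [Bool.false_eq_true, if_false, hsetgen (t y)]
        rw [happ, hy']; simp

theorem backfill_eq_aux (r : List String) (e : Nat) (he : e < r.length) :
    ∀ j, j ≤ e →
      (List.range j).foldl (fun r' i => r'.set i (r'.getD e "")) r =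
        List.replicate j (r.getD e "") ++ r.drop j := by
  intro j
  induction j with
  | zero => intro _; simp
  | succ j ih =>
    intro hj
    rw [List.range_succ, List.foldl_append, ih (by omega)]
    have hlenrep : (List.replicate j (r.getD e "") : List String).length = j := by simp
    have hget : (List.replicate j (r.getD e "") ++ r.drop j).getD e "" = r.getD e "" := by
      rw [List.getD_append_right _ _ _ _ (by simp; omega)]
      simp only [hlenrep]
      rw [List.getD_eq_getElem _ _ (by simp; omega), List.getD_eq_getElem _ _ (by omega)]
      simp only [List.getElem_drop]
      congr 1
      omega
    have hdrop : r.drop j = r.getD j "" :: r.drop (j+1) := by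
      rw [List.getD_eq_getElem _ _ (by omega)]
      have hjr : j < r.length := by omega
      exact List.drop_eq_getElem_cons hjr
    simp only [List.foldl_cons, List.foldl_nil, hget]
    rw [List.set_append_right _ _ (by simp)]
    simp only [hlenrep]
    rw [hdrop]
    have h0 : j - j = 0 := by omega
    rw [h0]
    simp [List.replicate_succ']

theorem pvFfwd_replicate_prefix {α : Type} (m : α → Bool) (t : α → String) (cur : String)
    (pre rest : List α) (hpre : ∀ y ∈ pre, m y = true) :
    pvFfwd m t cur (pre ++ rest) = List.replicate pre.length cur ++ pvFfwd m t cur rest := by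
  induction pre with
  | nil => simp
  | cons z zs ih =>
    have hz : m z = true := hpre z (by simp)
    simp [pvFfwd, hz, List.replicate_succ, ih (fun y hy => hpre y (by simp [hy]))]

-- realsOf computes B's enumerate-filter-map comprehension
theorem reals_eq_realsOf {α : Type} (m : α → Bool) (t : α → String) (xs : List α) (i : Int) :
    ((PySem.List.enumerate xs i).filter (fun p => !m p.2)).map (fun p => (p.1, t p.2)) =
      realsOf m t i xs := by
  induction xs generalizing i with
  | nil => simp [PySem.List.enumerate_nil, realsOf]
  | cons x xs ih =>
    rw [PySem.List.enumerate_cons]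
    by_cases hx : m x = true
    · simp [realsOf, hx, ih]
    · have hx' : m x = false := by revert hx; cases m x <;> simp
      simp [realsOf, hx', ih]

theorem realsOf_missing_prefix {α : Type} (m : α → Bool) (t : α → String) (g rest : List α)
    (i : Int) (hg : ∀ y ∈ g, m y = true) :
    realsOf m t i (g ++ rest) = realsOf m t (i + g.length) rest := by
  induction g generalizing i with
  | nil => simp
  | cons z zs ih =>
    have hz : m z = true := hg z (by simp)
    rw [List.cons_append, realsOf, if_pos hz, ih _ (fun y hy => hg y (by simp [hy]))]
    congr 1
    simp only [List.length_cons]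
    push_cast
    omega

-- the zip-fold of B equals the recursive block emitter
theorem zip_flatMap_eq_blocksOf (rs : List (Int × String)) (total : Int) :
    (rs.zip ((rs.drop 1).map Prod.fst ++ [total])).flatMap
        (fun p => List.replicate (p.2 - p.1.1).toNat p.1.2) =
      blocksOf rs total := by
  induction rs with
  | nil => rfl
  | cons p rest ih =>
    obtain ⟨i, v⟩ := p
    cases rest with
    | nil => simp [blocksOf]
    | cons q rest' =>
      obtain ⟨j, w⟩ := q
      have hb : blocksOf ((i, v) :: (j, w) :: rest') total =
          List.replicate (j - i).toNat v ++ blocksOf ((j, w) :: rest') total := rfl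
      rw [hb, ← ih]
      simp

-- main block/forward-fill correspondence: on a list whose head is real,
-- the blocks of its reals are exactly the forward fill
theorem blocksOf_realsOf {α : Type} (m : α → Bool) (t : α → String) :
    ∀ (n : Nat) (items : List α), items.length ≤ n →
      ∀ (x : α) (tail : List α), items = x :: tail → m x = false →
      ∀ (offset : Int) (cur : String),
        blocksOf (realsOf m t offset items) (offset + items.length) = pvFfwd m t cur items := by
  intro n
  induction n with
  | zero => intro items h x tail hi; subst hi; simp at h
  | succ n ih =>
    intro items hlen x tail hi hx offset cur
    subst hi
    set g := tail.takeWhile m with hgdef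
    set rest := tail.dropWhile m with hrdef
    have htail : tail = g ++ rest := (List.takeWhile_append_dropWhile).symm
    have hg : ∀ y ∈ g, m y = true := fun y hy => List.mem_takeWhile_imp hy
    have hreals : realsOf m t offset (x :: tail) =
        (offset, t x) :: realsOf m t (offset + 1 + g.length) rest := by
      rw [realsOf, if_neg (by simp [hx]), htail,
        realsOf_missing_prefix m t g rest (offset + 1) hg]
    have hffwd : pvFfwd m t cur (x :: tail) =
        t x :: (List.replicate g.length (t x) ++ pvFfwd m t (t x) rest) := by
      rw [pvFfwd, htail]
      simp [hx, pvFfwd_replicate_prefix m t (t x) g rest hg]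
    cases hrest : rest with
    | nil =>
      have hlg : tail.length = g.length := by rw [htail, hrest]; simp
      have hcount : ((offset + ((x :: tail).length : Int) - offset).toNat) = g.length + 1 := by
        simp only [List.length_cons, hlg]
        push_cast
        omega
      rw [hreals, hrest, hffwd, hrest]
      simp only [realsOf, blocksOf, hcount]
      simp [pvFfwd, List.replicate_succ]
    | cons y rest' =>
      have hdw2 : List.dropWhile m tail = y :: rest' := by rw [← hrdef, hrest]
      have hy : m y = false := by
        have := List.head_dropWhile_not m (l := tail) (by simp [hdw2])
        simpa [hdw2] using this
      have hreals2 : realsOf m t (offset + 1 + g.length) rest =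
          (offset + 1 + g.length, t y) :: realsOf m t (offset + 1 + g.length + 1) rest' := by
        rw [hrest, realsOf, if_neg (by simp [hy])]
      have hlenr : rest.length ≤ n := by
        have := congrArg List.length htail
        simp at hlen this
        omega
      have hih := ih rest hlenr y rest' hrest hy (offset + 1 + g.length) (t x)
      have htot : offset + 1 + ↑g.length + ↑rest.length = offset + ↑(x :: tail).length := by
        have := congrArg List.length htail
        simp at this ⊢
        omega
      rw [hreals, hreals2, blocksOf]
      rw [← hreals2]
      have hcount : ((offset + 1 + ↑g.length - offset).toNat) = g.length + 1 := by omega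
      rw [hcount, hffwd]
      rw [htot] at hih
      rw [hih, hrest]
      simp [List.replicate_succ]

-- B's fill, characterised on a list that is a missing prefix followed by a real element
theorem fillB_char {α : Type} (m : α → Bool) (t : α → String)
    (pre : List α) (x : α) (tail : List α)
    (hpre : ∀ y ∈ pre, m y = true) (hx : m x = false) :
    fillB (pre ++ x :: tail) m t =
      List.replicate pre.length (t x) ++ pvFfwd m t "" (x :: tail) := by
  have hne : ((pre ++ x :: tail).isEmpty) = false := by simp
  rw [fillB]
  simp only [hne, Bool.false_eq_true, if_false]
  rw [reals_eq_realsOf m t (pre ++ x :: tail) 0,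
    realsOf_missing_prefix m t pre (x :: tail) 0 hpre]
  have hreals : realsOf m t (0 + pre.length) (x :: tail) =
      ((pre.length : Int), t x) :: realsOf m t ((pre.length : Int) + 1) tail := by
    rw [realsOf, if_neg (by simp [hx])]
    norm_num
  rw [hreals]
  rw [PySem.List.foldl_append_eq_flatMap]
  rw [← hreals]
  have htot : ((pre ++ x :: tail).length : Int) = (0 + pre.length) + ((x :: tail).length : Int) := by
    simp
  rw [htot, zip_flatMap_eq_blocksOf,
    blocksOf_realsOf m t (x :: tail).length (x :: tail) (le_refl _) x tail rfl hx
      (0 + (pre.length : Int)) ""]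
  rw [hreals]
  simp

theorem fillA_char {α : Type} (d : α) (m : α → Bool) (t : α → String)
    (pre : List α) (x : α) (tail : List α)
    (hpre : ∀ y ∈ pre, m y = true) (hx : m x = false) :
    fillA d m t (pre ++ x :: tail) =
      List.replicate pre.length (t x) ++ pvFfwd m t "" (x :: tail) := by
  set items := pre ++ x :: tail with hitems
  have hfn : pre.length + (tail.length + 1) = items.length := by
    simp [hitems]
  have hsplit : items.take items.length = pre ++ x :: tail := by
    rw [List.take_length]
  set W := pvFfwd m t "" (x :: tail) with hWdef
  have hWlen : W.length = tail.length + 1 := by rw [hWdef, length_pvFfwd]; simp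
  have hWhead : W = t x :: pvFfwd m t (t x) tail := by rw [hWdef]; simp [pvFfwd, hx]
  have hloop := loopA_found d m t items items.length pre x tail (le_refl _) hsplit hpre hx
  rw [fillA, hloop]
  simp only [Nat.sub_self, List.replicate_zero, List.append_nil]
  have hlen : pre.length < (List.replicate pre.length "" ++ W).length := by
    simp [hWlen]
  rw [backfill_eq_aux _ _ hlen pre.length (le_refl _)]
  have hget : (List.replicate pre.length "" ++ W).getD pre.length "" = t x := by
    rw [List.getD_append_right _ _ _ _ (by simp)]
    simp [hWhead]
  have hdrop : (List.replicate pre.length "" ++ W).drop pre.length = W := by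
    have h6 := @List.drop_left String (List.replicate pre.length "") W
    rwa [List.length_replicate] at h6
  rw [hget, hdrop]

theorem fillA_eq_fillB {α : Type} (d : α) (m : α → Bool) (t : α → String) (items : List α)
    (h : items = [] ∨ ∃ x ∈ items, m x = false) :
    fillA d m t items = fillB items m t := by
  rcases h with h | ⟨x0, hx0mem, hx0⟩
  · subst h; rfl
  · have hdw : items.dropWhile m ≠ [] := by
      intro hnil
      have := List.dropWhile_eq_nil_iff.mp hnil x0 hx0mem
      rw [hx0] at this; exact Bool.false_ne_true this
    set pre := items.takeWhile m with hpredef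
    set x := (items.dropWhile m).head hdw with hxdef
    set tail := (items.dropWhile m).tail with htaildef
    have hitems : items = pre ++ x :: tail := by
      rw [hpredef, hxdef, htaildef]
      rw [List.cons_head_tail hdw, List.takeWhile_append_dropWhile]
    have hxreal : m x = false := by
      have := List.head_dropWhile_not m hdw
      simpa [hxdef] using this
    have hpre : ∀ y ∈ pre, m y = true := fun y hy => List.mem_takeWhile_imp hy
    rw [hitems, fillA_char d m t pre x tail hpre hxreal,
      fillB_char m t pre x tail hpre hxreal]

theorem fillB_congr {α : Type} (items : List α) (m : α → Bool) (t1 t2 : α → String)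
    (h : ∀ x, m x = false → t1 x = t2 x) :
    fillB items m t1 = fillB items m t2 := by
  have hreals : ((PySem.List.enumerate items).filter (fun p => !m p.2)).map
      (fun p => (p.1, t1 p.2)) =
      ((PySem.List.enumerate items).filter (fun p => !m p.2)).map
      (fun p => (p.1, t2 p.2)) := by
    apply List.map_congr_left
    intro p hp
    have := (List.mem_filter.mp hp).2
    have hm : m p.2 = false := by simpa using this
    rw [h p.2 hm]
  rw [fillB, fillB, hreals]

theorem splitlineA_eq_fillA (line : String) :
    splitlineA line =
      PySem.Str.join "" (fillA ' ' (fun c => c == '?') (fun c => String.ofList [c]) line.toList) := rfl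

theorem do_case_eq_fillA (parsed : List String) :
    do_case parsed = PySem.Str.join "\n" (fillA "" noInitA splitlineA parsed) := rfl

-- ===== VERDICT (by name: the statement is the Claim_ definition above) =====
theorem do_case_spec : Claim_equal_do_case := by
  intro parsed _hdom hpre
  show do_case parsed = do_case_alt parsed
  have hpre' : parsed = [] ∨ ∃ l ∈ parsed, noInitA l = false := by
    rcases hpre with h | ⟨l, hl, hne⟩
    · exact Or.inl h
    · refine Or.inr ⟨l, hl, ?_⟩
      simp only [noInitA, beq_eq_false_iff_ne, ne_eq]
      exact hne
  have hchar : ∀ l, noInitA l = false →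
      splitlineA l =
        PySem.Str.join "" (fillB l.toList (fun c => c == '?') (fun c => String.ofList [c])) := by
    intro l hl
    rw [splitlineA_eq_fillA]
    congr 1
    apply fillA_eq_fillB
    right
    by_contra hc
    push Not at hc
    have hall : ∀ c ∈ l.toList, c = '?' := by
      intro c hcmem
      have := hc c hcmem
      revert this
      cases hq : (c == '?') <;> simp_all
    have hrep := List.eq_replicate_of_mem hall
    rw [noInitA, hrep] at hl
    simp at hl
  calc do_case parsed
      = PySem.Str.join "\n" (fillA "" noInitA splitlineA parsed) := do_case_eq_fillA parsed
    _ = PySem.Str.join "\n" (fillB parsed noInitA splitlineA) := by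
        rw [fillA_eq_fillB "" noInitA splitlineA parsed hpre']
    _ = PySem.Str.join "\n" (fillB parsed noInitA
          (fun l => PySem.Str.join "" (fillB l.toList (fun c => c == '?')
            (fun c => String.ofList [c])))) := by
        rw [fillB_congr parsed noInitA splitlineA _ (fun l h => hchar l h)]
    _ = do_case_alt parsed := rfl
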